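-- pv_equiv track=rewrite | github.com/bodasadallah/RevUtil | inference/utils.py | merge_short_sentences
-- ===== SOURCE A (Python) =====
-- def merge_short_sentences(paragpraphs):
--     ret = []
--     res = ''
--     for p in paragpraphs:
--         # if this paragraph is short, then add it to the next one
--         if len(p.split()) < 5:
--             res = res + p
--         else:
--             ret.append(res + p)
--             res = ''
--     if res:
--         ret.append(res)
--
--     return ret
-- ===== SOURCE B (Python) =====
-- def merge_short_sentences(paragpraphs):
--     # index-table-then-slice-join: record positions of long paragraphs, then
--     # emit one joined slice per long paragraph, plus the trailing remainder.
--     long_idx = [i for i, p in enumerate(paragpraphs) if len(p.split()) >= 5]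
--     out = []
--     prev = -1
--     for i in long_idx:
--         out.append(''.join(paragpraphs[prev + 1:i + 1]))
--         prev = i
--     tail = ''.join(paragpraphs[prev + 1:])
--     if tail:
--         out.append(tail)
--     return out
-- ===== Notes on version B (the rewrite author's own statement) =====
-- stated objective: alternative
-- what changed: Replaces A's streaming string accumulator with a two-phase index-table traversal: first collect the indices of long paragraphs, then emit one joined slice per long index plus the joined trailing slice.
import Mathlib
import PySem

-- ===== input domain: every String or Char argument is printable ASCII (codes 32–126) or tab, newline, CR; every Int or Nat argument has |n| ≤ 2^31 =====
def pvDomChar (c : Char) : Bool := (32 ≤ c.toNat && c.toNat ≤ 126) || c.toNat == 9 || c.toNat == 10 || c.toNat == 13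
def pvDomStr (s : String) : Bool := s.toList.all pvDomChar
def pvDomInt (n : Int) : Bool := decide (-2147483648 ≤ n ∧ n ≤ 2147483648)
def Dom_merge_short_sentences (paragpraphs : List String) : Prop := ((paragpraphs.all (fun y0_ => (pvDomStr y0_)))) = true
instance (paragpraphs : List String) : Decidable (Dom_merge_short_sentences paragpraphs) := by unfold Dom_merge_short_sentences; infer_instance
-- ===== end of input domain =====

-- B replaces A's streaming string accumulator with an index-table-then-slice-join traversal (alternative decomposition, same cost).

-- ===== PORT A =====
def merge_short_sentences (paragpraphs : List String) : List String :=
  let st := paragpraphs.foldl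
    (fun (acc : List String × String) p =>
      if (PySem.Str.split₀ p).length < 5 then (acc.1, acc.2 ++ p)
      else (acc.1 ++ [acc.2 ++ p], "")) ([], "")
  if st.2 = "" then st.1 else st.1 ++ [st.2]

-- ===== PORT B =====
def merge_short_sentences_alt (paragpraphs : List String) : List String :=
  let long_idx := (PySem.List.enumerate paragpraphs 0).filterMap
    (fun ip => if 5 ≤ (PySem.Str.split₀ ip.2).length then some ip.1 else none)
  let st := long_idx.foldl
    (fun (acc : List String × Int) i =>
      (acc.1 ++ [PySem.Str.join "" (PySem.List.slice paragpraphs (some (acc.2 + 1)) (some (i + 1)))], i))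
    ([], -1)
  let tail := PySem.Str.join "" (PySem.List.slice paragpraphs (some (st.2 + 1)) none)
  if tail = "" then st.1 else st.1 ++ [tail]

-- ===== PRECONDITION & SPEC =====
def Spec_merge_short_sentences (paragpraphs : List String) (out : List String) : Prop := out = merge_short_sentences_alt paragpraphs
instance (paragpraphs : List String) (out : List String) : Decidable (Spec_merge_short_sentences paragpraphs out) := by unfold Spec_merge_short_sentences; infer_instance

-- ===== CLAIM (what is proved, stated in full; the proofs are below) =====
def Claim_equal_merge_short_sentences : Prop := ∀ (paragpraphs : List String), Dom_merge_short_sentences paragpraphs → Spec_merge_short_sentences paragpraphs (merge_short_sentences paragpraphs)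

-- ===== LEMMAS AND PROOFS =====

-- ''.join as a String function
def joinS (l : List String) : String := PySem.Str.join "" l

-- reference recursion (pending group kept as a list) both ports are reduced to
def specMerge : List String → List String → List String
  | [], pend => if joinS pend = "" then [] else [joinS pend]
  | p :: ps, pend =>
    if (PySem.Str.split₀ p).length < 5 then specMerge ps (pend ++ [p])
    else joinS (pend ++ [p]) :: specMerge ps []

-- A's recursion with a string accumulator
def coreS : List String → String → List String
  | [], res => if res = "" then [] else [res]
  | p :: ps, res =>
    if (PySem.Str.split₀ p).length < 5 then coreS ps (res ++ p)
    else (res ++ p) :: coreS ps ""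

-- B's long-index list, structurally
def idxs : List String → Nat → List Int
  | [], _ => []
  | p :: ps, s => if (PySem.Str.split₀ p).length < 5 then idxs ps (s + 1)
                  else (s : Int) :: idxs ps (s + 1)

theorem charsJoin_nil_append (xs : List (List Char)) (y : List Char) :
    PySem.Chars.join [] (xs ++ [y]) = PySem.Chars.join [] xs ++ y := by
  induction xs with
  | nil => simp [PySem.Chars.join_singleton, PySem.Chars.join_nil]
  | cons x xs ih =>
    cases xs with
    | nil => simp [PySem.Chars.join_cons_cons, PySem.Chars.join_singleton]
    | cons a as =>
      have h1 : PySem.Chars.join [] ((x :: a :: as) ++ [y])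
          = x ++ PySem.Chars.join [] ((a :: as) ++ [y]) := by
        simp [PySem.Chars.join_cons_cons]
      rw [h1, ih, PySem.Chars.join_cons_cons]
      simp [List.append_assoc]

theorem joinS_nil : joinS [] = "" := by
  rw [← String.toList_inj]
  simp [joinS, PySem.Str.toList_join, PySem.Chars.join_nil]

theorem joinS_append (pend : List String) (p : String) :
    joinS (pend ++ [p]) = joinS pend ++ p := by
  rw [← String.toList_inj]
  simp [joinS, PySem.Str.toList_join, charsJoin_nil_append]

-- A's fold+flush equals coreS
theorem A_gen (ps : List String) (ret : List String) (res : String) :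
    (let st := ps.foldl
        (fun (acc : List String × String) p =>
          if (PySem.Str.split₀ p).length < 5 then (acc.1, acc.2 ++ p)
          else (acc.1 ++ [acc.2 ++ p], "")) (ret, res)
     if st.2 = "" then st.1 else st.1 ++ [st.2])
    = ret ++ coreS ps res := by
  induction ps generalizing ret res with
  | nil => simp [coreS]; split <;> simp
  | cons p ps ih =>
    simp only [List.foldl_cons, coreS]
    split
    · exact ih ret (res ++ p)
    · rw [ih (ret ++ [res ++ p]) ""]; simp

theorem coreS_spec (ps : List String) (pend : List String) :
    coreS ps (joinS pend) = specMerge ps pend := by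
  induction ps generalizing pend with
  | nil => simp [coreS, specMerge]
  | cons p ps ih =>
    simp only [coreS, specMerge]
    split
    · rw [← joinS_append, ih]
    · rw [← joinS_append]
      have := ih ([] : List String)
      rw [joinS_nil] at this
      rw [this]

-- enumerate+filterMap computes idxs
theorem filterMap_enumerate_eq_idxs (xs : List String) (s : Nat) :
    ((PySem.List.enumerate xs (s : Int)).filterMap
      (fun ip => if 5 ≤ (PySem.Str.split₀ ip.2).length then some ip.1 else none))
    = idxs xs s := by
  induction xs generalizing s with
  | nil => simp [PySem.List.enumerate_nil, idxs]
  | cons p ps ih =>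
    rw [PySem.List.enumerate_cons]
    have hs : (s : Int) + 1 = ((s + 1 : Nat) : Int) := by push_cast; ring
    simp only [List.filterMap_cons, idxs, hs, ih]
    by_cases h : (PySem.Str.split₀ p).length < 5
    · have : ¬ (5 ≤ (PySem.Str.split₀ p).length) := by omega
      simp [h, this]
    · have : 5 ≤ (PySem.Str.split₀ p).length := by omega
      simp [h, this]

-- B's loop over (idxs rest A.length) starting at prev = j-1, slices taken in A ++ rest
theorem B_gen (rest : List String) (A out : List String) (j : Nat) (hj : j ≤ A.length) :
    (let full := A ++ rest
     let st := (idxs rest A.length).foldl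
        (fun (acc : List String × Int) i =>
          (acc.1 ++ [PySem.Str.join "" (PySem.List.slice full (some (acc.2 + 1)) (some (i + 1)))], i))
        (out, (j : Int) - 1)
     let tail := PySem.Str.join "" (PySem.List.slice full (some (st.2 + 1)) none)
     if tail = "" then st.1 else st.1 ++ [tail])
    = out ++ specMerge rest (A.drop j) := by
  induction rest generalizing A out j with
  | nil =>
    have hjj : (j : Int) - 1 + 1 = ((j : Nat) : Int) := by ring
    simp only [idxs, List.foldl_nil, List.append_nil, hjj,
      PySem.List.slice_from_natCast, specMerge]
    show (if joinS (A.drop j) = "" then out else out ++ [joinS (A.drop j)]) = _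
    split <;> simp
  | cons p ps ih =>
    have hdrop : (A ++ [p]).drop j = A.drop j ++ [p] :=
      List.drop_append_of_le_length hj
    have hAl : (A ++ [p]).length = A.length + 1 := by simp
    by_cases h : (PySem.Str.split₀ p).length < 5
    · -- short: index list skips this position; the pending group grows
      have hidxs : idxs (p :: ps) A.length = idxs ps (A.length + 1) := by
        simp [idxs, h]
      have hspec : specMerge (p :: ps) (A.drop j) = specMerge ps (A.drop j ++ [p]) := by
        simp [specMerge, h]
      have step := ih (A ++ [p]) out j (by simp; omega)
      rw [hAl, hdrop] at step
      simp only [List.append_assoc, List.cons_append, List.nil_append] at step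
      rw [hidxs, hspec]
      exact step
    · -- long: one fold step emits the slice A[j:] ++ [p], then restart with empty pending
      have hjj : (j : Int) - 1 + 1 = ((j : Nat) : Int) := by ring
      have hlen : ((A.length : Nat) : Int) + 1 = ((A.length + 1 : Nat) : Int) := by
        push_cast; ring
      have hidxs : idxs (p :: ps) A.length = (A.length : Int) :: idxs ps (A.length + 1) := by
        simp [idxs, h]
      have hspec : specMerge (p :: ps) (A.drop j)
          = joinS (A.drop j ++ [p]) :: specMerge ps [] := by
        simp [specMerge, h]
      have hslice : PySem.List.slice (A ++ p :: ps) (some ((j : Nat) : Int))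
          (some ((A.length + 1 : Nat) : Int)) = A.drop j ++ [p] := by
        rw [PySem.List.slice_natCast, List.drop_append_of_le_length hj,
          show A.length + 1 - j = (A.drop j).length + 1 by simp; omega,
          List.take_append]
        simp
      have step := ih (A ++ [p]) (out ++ [joinS (A.drop j ++ [p])]) (A.length + 1)
        (by simp)
      rw [hAl, show (A ++ [p]).drop (A.length + 1) = [] by simp] at step
      simp only [List.append_assoc, List.cons_append, List.nil_append] at step
      rw [hidxs, hspec]
      simp only [List.foldl_cons, hjj, hlen, hslice]
      rw [show ((A.length : Nat) : Int) = ((A.length + 1 : Nat) : Int) - 1 by push_cast; ring]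
      rw [show PySem.Str.join "" (A.drop j ++ [p]) = joinS (A.drop j ++ [p]) from rfl]
      rw [step]

-- ===== VERDICT (by name: the statement is the Claim_ definition above) =====
theorem merge_short_sentences_spec : Claim_equal_merge_short_sentences := by
  intro ps _
  show merge_short_sentences ps = merge_short_sentences_alt ps
  have hA : merge_short_sentences ps = coreS ps "" := by
    have := A_gen ps [] ""
    simpa [merge_short_sentences] using this
  have hB : merge_short_sentences_alt ps = specMerge ps [] := by
    have hidx := filterMap_enumerate_eq_idxs ps 0
    have hmain := B_gen ps [] [] 0 (by simp)
    simp only [Nat.cast_zero, zero_sub] at hidx hmain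
    simp only [List.nil_append, List.length_nil, List.drop_nil] at hmain
    simp only [merge_short_sentences_alt]
    rw [hidx]
    exact hmain
  rw [hA, hB, ← coreS_spec ps [], joinS_nil]
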